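-- pv_equiv track=rewrite | github.com/ASSERT-KTH/Mokav | experiments/pynguin/c4b/single-return/generated_tests/src_2115/8/src_2115.py | func
-- ===== SOURCE A (Python) =====
-- def func(*args):
--
-- 	import re
-- 	s = args[0]
-- 	s = args[1]
-- 	l = 0
-- 	a = 0
-- 	for i in range(len(s)):
-- 	    if ((i == 0) or (s[(i - 1)] != s[i])):
-- 	        a += l
-- 	        l = 0
-- 	    else:
-- 	        l += 1
-- 	return((a + l))
-- ===== SOURCE B (Python) =====
-- def func(*args):
--     s = args[0]
--     s = args[1]
--     def count(t):
--         if len(t) < 2: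
--             return 0
--         m = len(t) // 2
--         return count(t[:m]) + count(t[m:]) + (1 if t[m - 1] == t[m] else 0)
--     return count(s)
-- ===== Notes on version B (the rewrite author's own statement) =====
-- stated objective: alternative
-- what changed: Replaces A's single indexed pass with two accumulators by a divide-and-conquer recursion: split the string at the midpoint, count adjacent-equal pairs in each half recursively, and add 1 if the two boundary characters match.
import Mathlib
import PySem

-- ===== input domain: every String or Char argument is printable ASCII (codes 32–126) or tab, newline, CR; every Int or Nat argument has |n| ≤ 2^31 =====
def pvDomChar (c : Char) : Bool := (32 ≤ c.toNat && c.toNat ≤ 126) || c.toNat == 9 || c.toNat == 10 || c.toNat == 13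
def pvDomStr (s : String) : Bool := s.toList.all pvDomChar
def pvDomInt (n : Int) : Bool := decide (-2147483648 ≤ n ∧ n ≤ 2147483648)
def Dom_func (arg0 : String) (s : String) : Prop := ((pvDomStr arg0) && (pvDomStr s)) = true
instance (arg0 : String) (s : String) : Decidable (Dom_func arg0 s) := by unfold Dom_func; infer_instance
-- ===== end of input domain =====

-- B counts adjacent-equal pairs by divide and conquer (split at the midpoint, recurse on both
-- halves, +1 if the boundary characters match) instead of A's indexed single pass; alternative
-- decomposition, same result.

-- ===== PORT A =====
-- s = args[0]; s = args[1]; then: for i in range(len(s)): if i == 0 or s[i-1] != s[i]: a += l; l = 0 else l += 1; return a + l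
def func (arg0 : String) (s0 : String) : Int :=
  let s := arg0
  let s := s0
  let st := (PySem.List.pyRange 0 (PySem.Str.len s) 1).foldl
    (fun (p : Int × Int) i =>
      if i = 0 ∨ PySem.Str.pyGet? s (i - 1) ≠ PySem.Str.pyGet? s i then
        (0, p.2 + p.1)          -- a += l; l = 0   (state is (l, a))
      else
        (p.1 + 1, p.2))         -- l += 1
    (0, 0)
  st.2 + st.1

-- ===== PORT B =====
-- helper `count` of Source B: if len(t) < 2: 0 else split at m = len(t)//2 ('//' of nonnegatives =
-- Nat division, exact), recurse on t[:m] and t[m:] (slices with 0 ≤ m ≤ len = take/drop, exact),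
-- +1 if t[m-1] == t[m] (indices in range since 1 ≤ m < len, so getElem? comparison is exact).
def pvCount (cs : List Char) : Int :=
  if _h : cs.length < 2 then 0
  else
    let m := cs.length / 2
    pvCount (cs.take m) + pvCount (cs.drop m) +
      (if cs[m - 1]? = cs[m]? then 1 else 0)
termination_by cs.length
decreasing_by
  · simp; omega
  · simp; omega

-- s = args[0]; s = args[1]; return count(s)
def func_alt (arg0 : String) (s0 : String) : Int :=
  let s := arg0
  let s := s0
  pvCount s.toList

-- ===== PRECONDITION & SPEC =====
def Spec_func (arg0 : String) (s : String) (out : Int) : Prop := out = func_alt arg0 s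
instance (arg0 : String) (s : String) (out : Int) : Decidable (Spec_func arg0 s out) := by unfold Spec_func; infer_instance

-- ===== CLAIM (what is proved, stated in full; the proofs are below) =====
def Claim_equal_func : Prop := ∀ (arg0 : String) (s : String), Dom_func arg0 s → Spec_func arg0 s (func arg0 s)

-- ===== LEMMAS AND PROOFS =====

-- number of adjacent equal pairs: the common characterisation of both programs
def pvCnt : List Char → Int
  | a :: b :: t => (if a = b then 1 else 0) + pvCnt (b :: t)
  | _ => 0

-- boundary contribution when concatenating two blocks
def pvJoin : Option Char → Option Char → Int
  | some a, some b => if a = b then 1 else 0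
  | _, _ => 0

theorem pvCnt_append (xs ys : List Char) :
    pvCnt (xs ++ ys) = pvCnt xs + pvCnt ys + pvJoin xs.getLast? ys.head? := by
  induction xs with
  | nil => simp [pvCnt, pvJoin]
  | cons a t ih =>
    cases t with
    | nil =>
      cases ys with
      | nil => simp [pvCnt, pvJoin]
      | cons b u => simp [pvCnt, pvJoin]; omega
    | cons b t' =>
      show pvCnt (a :: b :: (t' ++ ys)) = _
      rw [pvCnt, show b :: (t' ++ ys) = (b :: t') ++ ys from rfl, ih,
        List.getLast?_cons_cons]
      rw [pvCnt]
      omega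

theorem pvCount_eq_pvCnt (cs : List Char) : pvCount cs = pvCnt cs := by
  induction hn : cs.length using Nat.strong_induction_on generalizing cs with
  | _ n ih =>
    rw [pvCount]
    by_cases h : cs.length < 2
    · rw [dif_pos h]
      match cs, h with
      | [], _ => rfl
      | [c], _ => rfl
    · rw [dif_neg h]
      have hlen : 2 ≤ cs.length := by omega
      have hm1 : 1 ≤ cs.length / 2 := by omega
      have hm2 : cs.length / 2 < cs.length := by omega
      subst hn
      have h1 : pvCount (cs.take (cs.length / 2)) = pvCnt (cs.take (cs.length / 2)) :=
        ih _ (by simp; omega) _ rfl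
      have h2 : pvCount (cs.drop (cs.length / 2)) = pvCnt (cs.drop (cs.length / 2)) :=
        ih _ (by simp; omega) _ rfl
      change pvCount (cs.take (cs.length / 2)) + pvCount (cs.drop (cs.length / 2)) +
          (if cs[cs.length / 2 - 1]? = cs[cs.length / 2]? then (1 : Int) else 0) = pvCnt cs
      rw [h1, h2]
      have hsplit := pvCnt_append (cs.take (cs.length / 2)) (cs.drop (cs.length / 2))
      rw [List.take_append_drop] at hsplit
      have hlast : (cs.take (cs.length / 2)).getLast? = some cs[cs.length / 2 - 1] := by
        rw [List.getLast?_eq_getElem?]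
        have hl : (cs.take (cs.length / 2)).length = cs.length / 2 := by simp; omega
        rw [hl, List.getElem?_take_of_lt (by omega), List.getElem?_eq_getElem (by omega)]
      have hhead : (cs.drop (cs.length / 2)).head? = some cs[cs.length / 2] := by
        rw [List.head?_drop, List.getElem?_eq_getElem (by omega)]
      rw [hlast, hhead] at hsplit
      have hg1 : cs[cs.length / 2 - 1]? = some cs[cs.length / 2 - 1] :=
        List.getElem?_eq_getElem (by omega)
      have hg2 : cs[cs.length / 2]? = some cs[cs.length / 2] :=
        List.getElem?_eq_getElem (by omega)
      rw [hsplit, hg1, hg2]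
      simp [pvJoin]

theorem pvCnt_append_singleton (xs : List Char) (c : Char) :
    pvCnt (xs ++ [c]) = pvCnt xs + (if xs.getLast? = some c then 1 else 0) := by
  rw [pvCnt_append]
  cases h : xs.getLast? with
  | none => simp [pvJoin, pvCnt]
  | some a => simp [pvJoin, pvCnt]

theorem getLast?_take_of_le (cs : List Char) (n : ℕ) (h1 : 1 ≤ n) (h2 : n ≤ cs.length) :
    (cs.take n).getLast? = some cs[n - 1] := by
  rw [List.getLast?_eq_getElem?]
  have hl : (cs.take n).length = n := by simp; omega
  rw [hl, List.getElem?_take_of_lt (by omega), List.getElem?_eq_getElem (by omega)]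

theorem func_loop (cs : List Char) (n : ℕ) (hn : n ≤ cs.length) :
    (((PySem.List.pyRange 0 (n : Int) 1).foldl
        (fun (p : Int × Int) i =>
          if i = 0 ∨ PySem.List.pyGet? cs (i - 1) ≠ PySem.List.pyGet? cs i then (0, p.2 + p.1)
          else (p.1 + 1, p.2))
        (0, 0)).2 +
      ((PySem.List.pyRange 0 (n : Int) 1).foldl
        (fun (p : Int × Int) i =>
          if i = 0 ∨ PySem.List.pyGet? cs (i - 1) ≠ PySem.List.pyGet? cs i then (0, p.2 + p.1)
          else (p.1 + 1, p.2))
        (0, 0)).1) = pvCnt (cs.take n) := by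
  induction n with
  | zero => simp [PySem.List.pyRange_one_eq_nil, pvCnt]
  | succ n ih =>
    have hn' : n ≤ cs.length := by omega
    have hcast : ((n + 1 : ℕ) : Int) = (n : Int) + 1 := by push_cast; ring
    rw [hcast, PySem.List.pyRange_one_succ_right (by positivity), List.foldl_append]
    simp only [List.foldl_cons, List.foldl_nil]
    set p := (PySem.List.pyRange 0 (n : Int) 1).foldl
        (fun (p : Int × Int) i =>
          if i = 0 ∨ PySem.List.pyGet? cs (i - 1) ≠ PySem.List.pyGet? cs i then (0, p.2 + p.1)
          else (p.1 + 1, p.2))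
        (0, 0) with hp
    have hsum : p.2 + p.1 = pvCnt (cs.take n) := ih hn'
    have htake : cs.take (n + 1) = cs.take n ++ [cs[n]] := by
      rw [List.take_add_one, List.getElem?_eq_getElem (by omega)]
      rfl
    rw [htake, pvCnt_append_singleton]
    rcases Nat.eq_zero_or_pos n with h0 | hpos
    · subst h0
      rw [if_pos (Or.inl (by norm_num))]
      simp [pvCnt]
      simpa [pvCnt] using hsum
    · have hne : ((n : Int)) ≠ 0 := by omega
      have hidx : ((n : Int)) - 1 = ((n - 1 : ℕ) : Int) := by omega
      have hget1 : PySem.List.pyGet? cs ((n : Int) - 1) = some cs[n - 1] := by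
        rw [hidx, PySem.List.pyGet?_natCast, List.getElem?_eq_getElem (by omega)]
      have hget2 : PySem.List.pyGet? cs ((n : Int)) = some cs[n] := by
        rw [PySem.List.pyGet?_natCast, List.getElem?_eq_getElem (by omega)]
        rfl
      have hlast := getLast?_take_of_le cs n hpos hn'
      by_cases heq : cs[n - 1] = cs[n]
      · rw [if_neg (by simp [hget1, hget2, heq]; omega)]
        rw [if_pos (by rw [hlast, heq])]
        simp
        omega
      · rw [if_pos (Or.inr (by simp [hget1, hget2, heq]))]
        rw [if_neg (by rw [hlast]; simp [heq])]
        simp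
        omega

theorem func_eq_pvCnt (arg0 s : String) : func arg0 s = pvCnt s.toList := by
  show (((PySem.List.pyRange 0 (PySem.Str.len s) 1).foldl _ (0, 0)).2 + _) = _
  have hlen : PySem.Str.len s = ((s.toList.length : ℕ) : Int) := by
    simp [PySem.Str.len_eq]
  have hget : ∀ i : Int, PySem.Str.pyGet? s i = PySem.List.pyGet? s.toList i := by
    intro i; simp [PySem.Str.pyGet?]
  simp only [hlen, hget]
  have := func_loop s.toList s.toList.length (le_refl _)
  rw [List.take_length] at this
  simpa using this

-- ===== VERDICT (by name: the statement is the Claim_ definition above) =====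
theorem func_spec : Claim_equal_func := by
  intro arg0 s _
  unfold Spec_func func_alt
  rw [func_eq_pvCnt, pvCount_eq_pvCnt]
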